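-- pv_equiv track=rewrite | github.com/BeomSeokYu/Algorithm | Baekjoon/Python/DataStructure/b9935.py | explosion
-- ===== SOURCE A (Python) =====
-- def explosion(main, exp):
--     stack = []
--     exp_len = len(exp)
--     for i in range(len(main)):
--         stack.append(main[i])
--         if ''.join(stack[-exp_len:]) == exp:
--             for _ in range(exp_len):
--                 stack.pop()
--     return ''.join(stack)
-- ===== SOURCE B (Python) =====
-- def explosion(main, exp):
--     # Build a string-matching automaton (KMP-style DFA, built incrementally) and
--     # keep the automaton state on the stack for O(1) match tracking per character.
--     if not exp:
--         return main
--     m = len(exp)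
--     alphabet = set(exp)
--     rows = [{c: (1 if c == exp[0] else 0) for c in alphabet}]
--     x = 0  # automaton state after feeding exp[1:q]
--     for q in range(1, m):
--         prev = rows[x]
--         rows.append({c: (q + 1 if c == exp[q] else prev[c]) for c in alphabet})
--         x = prev[exp[q]]
--     stack = []  # (char, automaton state after consuming this char)
--     state = 0
--     for ch in main:
--         state = rows[state].get(ch, 0)
--         stack.append((ch, state))
--         if state == m:
--             for _ in range(m):
--                 stack.pop()
--             state = stack[-1][1] if stack else 0
--     return ''.join(ch for ch, _ in stack)
-- ===== Notes on version B (the rewrite author's own statement) =====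
-- stated objective: faster
-- what changed: A re-checks the whole pattern against the stack top with a slice+join on every character (O(len(exp)) per step); B builds a KMP-style string-matching automaton once (incremental DFA construction, O(len(exp)*|alphabet|)) and keeps the automaton state on the stack, so each character of main is processed with one O(1) dict lookup.
import Mathlib
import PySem

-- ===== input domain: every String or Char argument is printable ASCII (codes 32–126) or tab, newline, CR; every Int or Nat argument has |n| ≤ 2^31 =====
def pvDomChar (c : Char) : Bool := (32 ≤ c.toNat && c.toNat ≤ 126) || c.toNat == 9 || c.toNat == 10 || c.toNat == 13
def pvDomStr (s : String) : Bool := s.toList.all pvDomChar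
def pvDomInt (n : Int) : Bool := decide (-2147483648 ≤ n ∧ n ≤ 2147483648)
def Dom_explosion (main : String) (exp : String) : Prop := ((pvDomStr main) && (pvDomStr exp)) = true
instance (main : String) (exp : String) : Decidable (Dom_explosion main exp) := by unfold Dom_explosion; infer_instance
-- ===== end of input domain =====

-- B replaces A's per-character O(len(exp)) slice-and-compare with a precomputed
-- string-matching automaton whose state is stored on the stack (O(1) per character).

-- ===== PORT A =====
-- one iteration of A's `for i in range(len(main))` loop body, acting on the stack
def explosionStep (p : List Char) (m : Nat) (stack : List Char) (c : Char) : List Char :=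
  let s := stack ++ [c]                                        -- stack.append(main[i])
  if PySem.List.slice s (some (-(m : Int))) none = p then      -- ''.join(stack[-exp_len:]) == exp
    (List.range m).foldl (fun st _ => st.dropLast) s           -- for _ in range(exp_len): stack.pop()
  else s

def explosion (main : String) (exp : String) : String :=
  let p := exp.toList
  let m := p.length                                            -- exp_len = len(exp)
  String.ofList (main.toList.foldl (explosionStep p m) [])     -- ''.join(stack)

-- ===== PORT B =====
-- Source B's first row: {c: (1 if c == exp[0] else 0) for c in alphabet}
def dfaRow0 (p : List Char) : PySem.Dict Char Nat :=
  (PySem.Set.ofList p).foldl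
    (fun row c => row.insert c (if c = p.headI then 1 else 0)) PySem.Dict.empty

-- Source B's loop body for one q: prev = rows[x]; rows.append({...}); x = prev[exp[q]]
def dfaStep (p : List Char) (acc : List (PySem.Dict Char Nat) × Nat) (q : Nat) :
    List (PySem.Dict Char Nat) × Nat :=
  let prev := (PySem.List.pyGet? acc.1 ((acc.2 : Nat) : Int)).getD PySem.Dict.empty
  let row := (PySem.Set.ofList p).foldl
    (fun row c => row.insert c (if c = p.getD q default then q + 1 else prev.getD c 0))
    PySem.Dict.empty
  (acc.1 ++ [row], prev.getD (p.getD q default) 0)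

-- Source B's `for q in range(1, m)` building the transition table
def buildTable (p : List Char) (m : Nat) : List (PySem.Dict Char Nat) :=
  ((List.range' 1 (m - 1)).foldl (dfaStep p) ([dfaRow0 p], 0)).1

-- one iteration of Source B's `for ch in main` loop: (stack of (char, state), current state)
def altStep (m : Nat) (table : List (PySem.Dict Char Nat))
    (acc : List (Char × Nat) × Nat) (ch : Char) : List (Char × Nat) × Nat :=
  let st := ((PySem.List.pyGet? table (acc.2 : Int)).getD PySem.Dict.empty).getD ch 0
                                                               -- state = delta[state].get(ch, 0)
  let stack := acc.1 ++ [(ch, st)]                             -- stack.append((ch, state))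
  if st = m then
    let stack := (List.range m).foldl (fun s _ => s.dropLast) stack
                                                               -- for _ in range(m): stack.pop()
    (stack, ((stack.getLast?).map Prod.snd).getD 0)            -- state = stack[-1][1] if stack else 0
  else (stack, st)

def explosion_alt (main : String) (exp : String) : String :=
  if exp = "" then main else                                   -- if not exp: return main
  let p := exp.toList
  let m := p.length
  let table := buildTable p m
  String.ofList (((main.toList.foldl (altStep m table) ([], 0)).1).map Prod.fst)
                                                               -- ''.join(ch for ch, _ in stack)

-- ===== PRECONDITION & SPEC =====
def Spec_explosion (main : String) (exp : String) (out : String) : Prop := out = explosion_alt main exp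
instance (main : String) (exp : String) (out : String) : Decidable (Spec_explosion main exp out) := by unfold Spec_explosion; infer_instance

-- ===== CLAIM (what is proved, stated in full; the proofs are below) =====
def Claim_equal_explosion : Prop := ∀ (main : String) (exp : String), Dom_explosion main exp → Spec_explosion main exp (explosion main exp)

-- ===== LEMMAS AND PROOFS =====

-- specification search: the largest j ≤ k with p.take j a suffix of t
-- (the quantity the automaton states track)
def bruteK (p t : List Char) : Nat → Nat
  | 0 => 0
  | k + 1 => if PySem.Chars.endswith t (p.take (k + 1)) then k + 1 else bruteK p t k

theorem bruteK_le (p t : List Char) (k : Nat) : bruteK p t k ≤ k := by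
  induction k with
  | zero => simp [bruteK]
  | succ k ih =>
    simp only [bruteK]
    split_ifs with h
    · exact le_refl _
    · exact ih.trans (Nat.le_succ _)

theorem bruteK_suffix (p t : List Char) (k : Nat) : p.take (bruteK p t k) <:+ t := by
  induction k with
  | zero => simp [bruteK]
  | succ k ih =>
    simp only [bruteK]; split_ifs with h
    · exact (PySem.Chars.endswith_iff _ _).mp h
    · exact ih

theorem bruteK_max (p t : List Char) (k : Nat) (j : Nat) (hj : j ≤ k)
    (hs : p.take j <:+ t) : j ≤ bruteK p t k := by
  induction k with
  | zero => omega
  | succ k ih =>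
    simp only [bruteK]; split_ifs with h
    · exact hj
    · rcases Nat.eq_or_lt_of_le hj with rfl | h'
      · exact absurd ((PySem.Chars.endswith_iff _ _).mpr hs) (by simpa using h)
      · exact ih (by omega)

theorem bruteK_eq (p t : List Char) (k : Nat) (j : Nat) (hj : j ≤ k)
    (hs : p.take j <:+ t) (hmax : ∀ i, i ≤ k → p.take i <:+ t → i ≤ j) :
    bruteK p t k = j :=
  Nat.le_antisymm (hmax _ (bruteK_le p t k) (bruteK_suffix p t k)) (bruteK_max p t k j hj hs)

theorem bruteK_nil (p : List Char) (m : Nat) (hp : p ≠ []) : bruteK p [] m = 0 := by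
  refine bruteK_eq p [] m 0 (Nat.zero_le _) (by simp) ?_
  intro i _ hsuf
  have h1 : p.take i = [] := List.suffix_nil.mp hsuf
  rcases List.take_eq_nil_iff.mp h1 with h | h
  · omega
  · exact absurd h hp

theorem append_singleton_suffix {a b : List Char} {x y : Char} :
    (a ++ [x]) <:+ (b ++ [y]) ↔ x = y ∧ a <:+ b := by
  constructor
  · intro h
    have h' := List.IsSuffix.reverse h
    simp only [List.reverse_append, List.reverse_singleton, List.singleton_append] at h'
    rcases List.cons_prefix_cons.mp h' with ⟨hxy, hp⟩
    exact ⟨hxy, by simpa using hp.reverse⟩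
  · rintro ⟨rfl, t, rfl⟩
    exact ⟨t, by simp⟩

theorem take_succ_getElem (p : List Char) (j : Nat) (h : j < p.length) :
    p.take (j + 1) = p.take j ++ [p[j]] := by
  rw [List.take_add_one]; simp [h]

-- automaton transition correctness: the new longest matched prefix depends only on
-- the old one (q) and the incoming character
theorem transition_eq (p s : List Char) (c : Char) :
    bruteK p (s ++ [c]) p.length
      = bruteK p (p.take (bruteK p s p.length) ++ [c]) (min p.length (bruteK p s p.length + 1)) := by
  generalize hqdef : bruteK p s p.length = q at *
  have hqs : p.take q <:+ s := hqdef ▸ bruteK_suffix p s p.length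
  have hrle : bruteK p (p.take q ++ [c]) (min p.length (q + 1)) ≤ min p.length (q + 1) :=
    bruteK_le _ _ _
  set r := bruteK p (p.take q ++ [c]) (min p.length (q + 1)) with hrdef
  refine bruteK_eq p (s ++ [c]) p.length r (le_trans hrle (Nat.min_le_left _ _)) ?_ ?_
  · -- p.take r is a suffix of s ++ [c]
    have h1 : p.take r <:+ p.take q ++ [c] := bruteK_suffix _ _ _
    have h2 : p.take q ++ [c] <:+ s ++ [c] := by
      obtain ⟨t, rfl⟩ := hqs; exact ⟨t, by simp⟩
    exact h1.trans h2
  · -- maximality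
    intro i him hsuf
    rcases i with _ | i
    · exact Nat.zero_le _
    · have hi : i < p.length := by omega
      rw [take_succ_getElem p i hi] at hsuf
      rcases append_singleton_suffix.mp hsuf with ⟨hc, hsuf'⟩
      have hiq : i ≤ q := hqdef ▸ bruteK_max p s p.length i (by omega) hsuf'
      have htq : p.take i <:+ p.take q := by
        refine List.suffix_of_suffix_length_le hsuf' hqs ?_
        simp [List.length_take]; omega
      have : p.take (i + 1) <:+ p.take q ++ [c] := by
        rw [take_succ_getElem p i hi, hc]
        exact append_singleton_suffix.mpr ⟨rfl, htq⟩
      exact bruteK_max p _ _ (i + 1) (by omega) this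
  
theorem bruteK_fresh (p s : List Char) (c : Char) (hp : p ≠ []) (hc : c ∉ p) :
    bruteK p (s ++ [c]) p.length = 0 := by
  refine bruteK_eq p (s ++ [c]) p.length 0 (Nat.zero_le _) (by simp) ?_
  intro i _ hsuf
  rcases i with _ | i
  · exact le_refl _
  · exfalso
    by_cases hi : i < p.length
    · rw [take_succ_getElem p i hi] at hsuf
      rcases append_singleton_suffix.mp hsuf with ⟨hceq, _⟩
      exact hc (hceq ▸ List.getElem_mem hi)
    · -- i + 1 > p.length : take (i+1) p = p, its last element is in p
      have hpl : p.take (i + 1) = p := List.take_of_length_le (by omega)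
      rw [hpl, ← List.dropLast_append_getLast hp] at hsuf
      rcases append_singleton_suffix.mp hsuf with ⟨hceq, _⟩
      exact hc (hceq ▸ List.getLast_mem hp)

theorem foldl_insert_getD {l : List Char} {f : Char → Nat} {d0 : PySem.Dict Char Nat} (c : Char) :
    (l.foldl (fun row x => row.insert x (f x)) d0).getD c 0
      = if c ∈ l then f c else d0.getD c 0 := by
  induction l generalizing d0 with
  | nil => simp
  | cons a l ih =>
    simp only [List.foldl_cons, ih, List.mem_cons]
    by_cases hl : c ∈ l
    · simp [hl]
    · simp only [hl, or_false, if_false]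
      rw [PySem.Dict.getD_insert]
      by_cases hca : c = a <;> simp [hca]

-- bruteK with the pattern-length bound never exceeds the text length
theorem bruteK_le_length (p t : List Char) : bruteK p t p.length ≤ t.length := by
  have h1 := bruteK_suffix p t p.length
  have h2 := h1.length_le
  rw [List.length_take] at h2
  have := bruteK_le p t p.length
  omega

theorem bruteK_bound_eq (p t : List Char) (k k' : Nat) (hkk : k ≤ k')
    (hle : bruteK p t k' ≤ k) : bruteK p t k = bruteK p t k' := by
  refine bruteK_eq p t k (bruteK p t k') hle (bruteK_suffix p t k') ?_
  intro i hik hsuf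
  exact bruteK_max p t k' i (le_trans hik hkk) hsuf

-- feeding the next pattern character advances the state by one
theorem bruteK_take_succ (p : List Char) (q : Nat) (hq : q < p.length) :
    bruteK p (p.take q ++ [p[q]]) p.length = q + 1 := by
  rw [← take_succ_getElem p q hq]
  refine bruteK_eq p (p.take (q + 1)) p.length (q + 1) (by omega) (List.suffix_refl _) ?_
  intro i him hsuf
  have := hsuf.length_le
  rw [List.length_take, List.length_take] at this
  omega

-- on a mismatch the first stack character is irrelevant
theorem bruteK_shift (p : List Char) (q : Nat) (c : Char) (hq : q < p.length)
    (hq1 : 1 ≤ q) (hc : c ≠ p[q]) :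
    bruteK p (p.take q ++ [c]) p.length = bruteK p ((p.take q).drop 1 ++ [c]) p.length := by
  refine bruteK_eq p (p.take q ++ [c]) p.length _ (bruteK_le _ _ _) ?_ ?_
  · have h1 : (p.take q).drop 1 ++ [c] <:+ p.take q ++ [c] := by
      obtain ⟨t, ht⟩ := List.drop_suffix 1 (p.take q)
      exact ⟨t, by rw [← List.append_assoc, ht]⟩
    exact (bruteK_suffix _ _ _).trans h1
  · intro i him hsuf
    rcases i with _ | j
    · exact Nat.zero_le _
    · have hj : j < p.length := by omega
      rw [take_succ_getElem p j hj] at hsuf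
      rcases append_singleton_suffix.mp hsuf with ⟨hcj, hsuf'⟩
      have hlen' := hsuf'.length_le
      rw [List.length_take, List.length_take] at hlen'
      have hjq : j ≤ q - 1 := by
        rcases Nat.lt_or_ge j q with h | h
        · omega
        · exfalso
          have : j = q := by omega
          subst this
          exact hc hcj.symm
      have htk : p.take j <:+ (p.take q).drop 1 := by
        refine List.suffix_of_suffix_length_le hsuf' (List.drop_suffix 1 (p.take q)) ?_
        rw [List.length_take, List.length_drop, List.length_take]
        omega
      have : p.take (j + 1) <:+ (p.take q).drop 1 ++ [c] := by
        rw [take_succ_getElem p j hj, hcj]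
        exact append_singleton_suffix.mpr ⟨rfl, htk⟩
      exact bruteK_max p _ _ (j + 1) (by omega) this

-- state after a single character
theorem bruteK_single (p : List Char) (c : Char) (hp : p ≠ []) :
    bruteK p [c] p.length
      = if c = p[0]'(List.length_pos_iff.mpr hp) then 1 else 0 := by
  have hm : 0 < p.length := List.length_pos_iff.mpr hp
  split_ifs with hc
  · have : p.take 0 ++ [p[0]] = [c] := by simp [hc]
    rw [← this]
    exact bruteK_take_succ p 0 hm
  · refine bruteK_eq p [c] p.length 0 (Nat.zero_le _) (by simp) ?_
    intro i him hsuf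
    rcases i with _ | j
    · exact le_refl _
    · exfalso
      have hj : j < p.length := by omega
      rw [take_succ_getElem p j hj] at hsuf
      rcases (append_singleton_suffix (a := p.take j) (b := []) (x := p[j]) (y := c)).mp
        hsuf with ⟨hcj, hsuf'⟩
      rcases List.take_eq_nil_iff.mp (List.suffix_nil.mp hsuf') with hj0 | hnil
      · subst hj0
        exact hc hcj.symm
      · exact hp hnil

theorem pyGet?_append_left' {α : Type} (xs ys : List α) (q : Nat) (h : q < xs.length) :
    PySem.List.pyGet? (xs ++ ys) ((q : Nat) : Int) = PySem.List.pyGet? xs ((q : Nat) : Int) := by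
  rw [PySem.List.pyGet?_natCast, PySem.List.pyGet?_natCast, List.getElem?_append_left h]

-- invariant of Source B's table-building fold: every built row holds the automaton
-- transition values, and x is the state after feeding exp[1:k+1]
theorem dfa_fold_inv (p : List Char) (hp : p ≠ []) (k : Nat) (hk : k < p.length) :
    ((List.range' 1 k).foldl (dfaStep p) ([dfaRow0 p], 0)).1.length = k + 1 ∧
    ((List.range' 1 k).foldl (dfaStep p) ([dfaRow0 p], 0)).2
      = bruteK p ((p.take (k + 1)).drop 1) p.length ∧
    ∀ q, q ≤ k → ∀ c,
      ((PySem.List.pyGet? ((List.range' 1 k).foldl (dfaStep p) ([dfaRow0 p], 0)).1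
          ((q : Nat) : Int)).getD PySem.Dict.empty).getD c 0
        = if c ∈ p then bruteK p (p.take q ++ [c]) p.length else 0 := by
  have hm : 0 < p.length := List.length_pos_iff.mpr hp
  induction k with
  | zero =>
    refine ⟨by simp, ?_, ?_⟩
    · have h1 : (p.take 1).drop 1 = [] := by
        apply List.eq_nil_of_length_eq_zero
        rw [List.length_drop, List.length_take]
        omega
      rw [h1, bruteK_nil p p.length hp]
      rfl
    · intro q hq c
      have hq0 : q = 0 := by omega
      subst hq0
      have hget : PySem.List.pyGet? [dfaRow0 p] ((0 : Nat) : Int) = some (dfaRow0 p) := by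
        rw [PySem.List.pyGet?_natCast]
        rfl
      simp only [List.range'_zero, List.foldl_nil] at *
      rw [hget]
      simp only [Option.getD_some]
      unfold dfaRow0
      rw [foldl_insert_getD]
      simp only [PySem.Set.mem_ofList, PySem.Dict.getD_empty]
      by_cases hcp : c ∈ p
      · simp only [hcp, if_true, List.take_zero, List.nil_append]
        rw [bruteK_single p c hp]
        have hhead : p.headI = p[0]'hm := by
          cases p with
          | nil => exact absurd rfl hp
          | cons a l => rfl
        rw [hhead]
      · simp [hcp]
  | succ k ih =>
    have hk' : k < p.length := by omega
    obtain ⟨ihlen, ihx, ihrow⟩ := ih hk'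
    have hrange : List.range' 1 (k + 1) = List.range' 1 k ++ [1 + k] := by
      have := List.range'_concat (step := 1) (s := 1) (n := k)
      simpa using this
    rw [hrange, List.foldl_append, List.foldl_cons, List.foldl_nil]
    -- abbreviations for the state reached after k steps
    set acc := (List.range' 1 k).foldl (dfaStep p) ([dfaRow0 p], 0) with hacc
    have hq1 : (1 + k) = k + 1 := by omega
    -- the x index is small enough to address a built row
    have hxlen : ((p.take (k + 1)).drop 1).length = k := by
      rw [List.length_drop, List.length_take]
      omega
    have hxle : acc.2 ≤ k := by
      rw [ihx]
      have := bruteK_le_length p ((p.take (k + 1)).drop 1)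
      omega
    have hxlt : acc.2 < p.length := by omega
    -- the row fetched as prev is row x
    have hprev : ∀ c, ((PySem.List.pyGet? acc.1 ((acc.2 : Nat) : Int)).getD
          PySem.Dict.empty).getD c 0
        = if c ∈ p then bruteK p (p.take acc.2 ++ [c]) p.length else 0 :=
      fun c => ihrow acc.2 hxle c
    -- p[k+1] as the Python indexing computes it
    have hgetD : p.getD (1 + k) default = p[k + 1]'(by omega) := by
      rw [List.getD_eq_getElem p default (by omega)]
      simp [hq1]
    -- transition through the automaton: S(tk ++ [c]) = row x at c, for c ∈ p
    have htrans : ∀ c, c ∈ p →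
        bruteK p ((p.take (k + 1)).drop 1 ++ [c]) p.length
          = bruteK p (p.take acc.2 ++ [c]) p.length := by
      intro c _
      have ht := transition_eq p ((p.take (k + 1)).drop 1) c
      rw [← ihx] at ht
      rw [ht]
      refine bruteK_bound_eq p _ _ _ (Nat.min_le_left _ _) ?_
      have h1 := bruteK_le_length p (p.take acc.2 ++ [c])
      have h2 := bruteK_le p (p.take acc.2 ++ [c]) p.length
      rw [List.length_append, List.length_take, List.length_cons, List.length_nil] at h1
      omega
    -- the new-row value equals the spec transition value, for c ∈ p
    have hrowval : ∀ c, c ∈ p →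
        (if c = p.getD (1 + k) default then 1 + k + 1 else
          ((PySem.List.pyGet? acc.1 ((acc.2 : Nat) : Int)).getD PySem.Dict.empty).getD c 0)
          = bruteK p (p.take (k + 1) ++ [c]) p.length := by
      intro c hcp
      rw [hgetD, hprev c]
      by_cases hc : c = p[k + 1]'(by omega)
      · rw [if_pos hc, hc, bruteK_take_succ p (k + 1) (by omega)]
        omega
      · rw [if_neg hc, if_pos hcp]
        rw [bruteK_shift p (k + 1) c (by omega) (by omega) hc]
        exact (htrans c hcp).symm
    constructor
    · show (acc.1 ++ _).length = k + 2
      rw [List.length_append, ihlen]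
      rfl
    constructor
    · -- the updated x
      show ((PySem.List.pyGet? acc.1 ((acc.2 : Nat) : Int)).getD PySem.Dict.empty).getD
          (p.getD (1 + k) default) 0 = _
      rw [hgetD, hprev]
      have hmem : p[k + 1]'(by omega) ∈ p := List.getElem_mem _
      rw [if_pos hmem]
      have hdrop : (p.take (k + 2)).drop 1 = (p.take (k + 1)).drop 1 ++ [p[k + 1]'(by omega)] := by
        rw [take_succ_getElem p (k + 1) (by omega),
            List.drop_append_of_le_length (by rw [List.length_take]; omega)]
      rw [hdrop]
      exact (htrans _ (List.getElem_mem _)).symm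
    · -- every row, including the new one
      intro q hq c
      have hsplit : (dfaStep p acc (1 + k)).1
          = acc.1 ++ [(PySem.Set.ofList p).foldl
              (fun row c => row.insert c (if c = p.getD (1 + k) default then 1 + k + 1
                else ((PySem.List.pyGet? acc.1 ((acc.2 : Nat) : Int)).getD
                  PySem.Dict.empty).getD c 0)) PySem.Dict.empty] := rfl
      by_cases hqk : q ≤ k
      · -- old rows are untouched
        have hqlt : q < acc.1.length := by omega
        rw [hsplit, pyGet?_append_left' _ _ q hqlt]
        exact ihrow q hqk c
      · -- the freshly appended row
        have hqeq : q = k + 1 := by omega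
        subst hqeq
        rw [hsplit]
        have hgetr : PySem.List.pyGet? (acc.1 ++ [(PySem.Set.ofList p).foldl
              (fun row c => row.insert c (if c = p.getD (1 + k) default then 1 + k + 1
                else ((PySem.List.pyGet? acc.1 ((acc.2 : Nat) : Int)).getD
                  PySem.Dict.empty).getD c 0)) PySem.Dict.empty]) (((k + 1 : Nat)) : Int)
            = some ((PySem.Set.ofList p).foldl
              (fun row c => row.insert c (if c = p.getD (1 + k) default then 1 + k + 1
                else ((PySem.List.pyGet? acc.1 ((acc.2 : Nat) : Int)).getD
                  PySem.Dict.empty).getD c 0)) PySem.Dict.empty) := by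
          rw [PySem.List.pyGet?_natCast, List.getElem?_append_right (by omega), ihlen]
          simp
        rw [hgetr]
        simp only [Option.getD_some]
        rw [foldl_insert_getD]
        simp only [PySem.Set.mem_ofList, PySem.Dict.getD_empty]
        by_cases hcp : c ∈ p
        · rw [if_pos hcp, if_pos hcp, hrowval c hcp]
        · simp [hcp]

-- interface used by the main invariant: table lookup = brute-force row value
theorem buildTable_getD (p : List Char) (hp : p ≠ []) (q : Nat) (c : Char)
    (hq : q < p.length) :
    ((PySem.List.pyGet? (buildTable p p.length) ((q : Nat) : Int)).getD
        PySem.Dict.empty).getD c 0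
      = if c ∈ p then bruteK p (p.take q ++ [c]) (min p.length (q + 1)) else 0 := by
  have hm : 0 < p.length := List.length_pos_iff.mpr hp
  have h := (dfa_fold_inv p hp (p.length - 1) (by omega)).2.2 q (by omega) c
  unfold buildTable
  rw [h]
  by_cases hcp : c ∈ p
  · rw [if_pos hcp, if_pos hcp]
    refine (bruteK_bound_eq p _ _ _ (Nat.min_le_left _ _) ?_).symm
    have h1 := bruteK_le_length p (p.take q ++ [c])
    rw [List.length_append, List.length_take, List.length_cons, List.length_nil] at h1
    omega
  · simp [hcp]

theorem foldl_dropLast {α : Type} (k : Nat) (s : List α) (hk : k ≤ s.length) :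
    (List.range k).foldl (fun st _ => st.dropLast) s = s.take (s.length - k) := by
  induction k with
  | zero => simp
  | succ k ih =>
    rw [List.range_succ, List.foldl_append, ih (by omega)]
    simp only [List.foldl_cons, List.foldl_nil]
    rw [List.dropLast_eq_take, List.take_take]
    congr 1
    simp [List.length_take]
    omega

-- A's match test is "p is a suffix of the stack"
theorem slice_eq_iff_suffix (p s : List Char) (hp : p ≠ []) :
    PySem.List.slice s (some (-(p.length : Int))) none = p ↔ p <:+ s := by
  have hm : 0 < p.length := List.length_pos_iff.mpr hp
  rw [PySem.List.slice_from_neg_natCast s p.length hm]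
  constructor
  · intro h; exact h ▸ List.drop_suffix _ _
  · rintro ⟨t, rfl⟩
    simp

theorem suffix_iff_bruteK_eq (p s : List Char) : p <:+ s ↔ bruteK p s p.length = p.length := by
  constructor
  · intro h
    exact Nat.le_antisymm (bruteK_le _ _ _)
      (bruteK_max p s p.length p.length (le_refl _) (by simpa using h))
  · intro h
    have := bruteK_suffix p s p.length
    rwa [h, List.take_length] at this

-- the loop invariant tying A's stack to B's (stack of (char, state), state)
def StackInv (p : List Char) (sa : List Char) (acc : List (Char × Nat) × Nat) : Prop :=
  sa = acc.1.map Prod.fst ∧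
  acc.2 = bruteK p sa p.length ∧
  acc.2 < p.length ∧
  ∀ i (h : i < acc.1.length), acc.1[i].2 = bruteK p (sa.take (i + 1)) p.length ∧ acc.1[i].2 < p.length

theorem inv_step (p : List Char) (hp : p ≠ []) (sa : List Char) (acc : List (Char × Nat) × Nat)
    (c : Char) (hinv : StackInv p sa acc) :
    StackInv p (explosionStep p p.length sa c) (altStep p.length (buildTable p p.length) acc c) := by
  obtain ⟨hmap, hst, hstlt, hstored⟩ := hinv
  have hlen : sa.length = acc.1.length := by rw [hmap]; simp
  -- the table lookup computes bruteK on the extended stack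
  have hlookup :
      ((PySem.List.pyGet? (buildTable p p.length) ((acc.2 : Nat) : Int)).getD PySem.Dict.empty).getD c 0
        = bruteK p (sa ++ [c]) p.length := by
    rw [buildTable_getD p hp acc.2 c hstlt]
    by_cases hc : c ∈ p
    · simp only [hc, if_true]
      rw [hst]
      exact (transition_eq p sa c).symm
    · simp only [hc, if_false]
      exact (bruteK_fresh p sa c hp hc).symm
  unfold explosionStep altStep
  simp only [hlookup]
  have hcond : (PySem.List.slice (sa ++ [c]) (some (-(p.length : Int))) none = p)
      ↔ bruteK p (sa ++ [c]) p.length = p.length := by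
    rw [slice_eq_iff_suffix p (sa ++ [c]) hp]; exact suffix_iff_bruteK_eq p (sa ++ [c])
  by_cases hmatch : bruteK p (sa ++ [c]) p.length = p.length
  · rw [if_pos (hcond.mpr hmatch), if_pos hmatch, hmatch]
    have hmpos : 0 < p.length := List.length_pos_iff.mpr hp
    have hmle : p.length ≤ sa.length + 1 := by
      have h1 : p <:+ sa ++ [c] := (suffix_iff_bruteK_eq p _).mpr hmatch
      have h2 := h1.length_le
      simpa using h2
    have hlen1 : (sa ++ [c]).length = sa.length + 1 := by simp
    have hlen2 : (acc.1 ++ [(c, p.length)]).length = sa.length + 1 := by simp [hlen]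
    rw [foldl_dropLast p.length (sa ++ [c]) (by rw [hlen1]; omega),
        foldl_dropLast p.length (acc.1 ++ [(c, p.length)]) (by rw [hlen2]; omega),
        hlen1, hlen2]
    set n := sa.length + 1 - p.length with hn
    have hnle : n ≤ sa.length := by omega
    have htake1 : (sa ++ [c]).take n = sa.take n := List.take_append_of_le_length hnle
    have htake2 : (acc.1 ++ [(c, p.length)]).take n = acc.1.take n :=
      List.take_append_of_le_length (by omega)
    rw [htake1, htake2]
    refine ⟨by rw [hmap, ← List.map_take], ?_, ?_, ?_⟩
    · -- new state = bruteK of the new stack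
      rcases Nat.eq_zero_or_pos n with hn0 | hnpos
      · rw [hn0]
        simp [bruteK_nil p p.length hp]
      · have hlt : n - 1 < (acc.1.take n).length := by rw [List.length_take]; omega
        rw [List.getLast?_eq_getElem?, List.length_take, Nat.min_eq_left (by omega),
            List.getElem?_eq_getElem hlt]
        simp only [Option.map_some, Option.getD_some]
        rw [List.getElem_take, (hstored (n - 1) (by omega)).1]
        have hsucc : n - 1 + 1 = n := by omega
        rw [hsucc]
    · -- new state below p.length
      rcases Nat.eq_zero_or_pos n with hn0 | hnpos
      · rw [hn0]
        simpa using hmpos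
      · have hlt : n - 1 < (acc.1.take n).length := by rw [List.length_take]; omega
        rw [List.getLast?_eq_getElem?, List.length_take, Nat.min_eq_left (by omega),
            List.getElem?_eq_getElem hlt]
        simp only [Option.map_some, Option.getD_some]
        rw [List.getElem_take]
        exact (hstored (n - 1) (by omega)).2
    · -- stored states of the surviving entries
      intro i hi
      rw [List.length_take] at hi
      have hilt : i < acc.1.length := by omega
      rw [List.getElem_take, List.take_take]
      have hmin : min (i + 1) n = i + 1 := by omega
      rw [hmin]
      exact hstored i hilt
  · rw [if_neg (fun h => hmatch (hcond.mp h)), if_neg hmatch]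
    refine ⟨by simp [hmap], rfl, ?_, ?_⟩
    · exact lt_of_le_of_ne (by simpa using bruteK_le p (sa ++ [c]) p.length) hmatch
    · intro i hi
      simp only [List.length_append, List.length_cons, List.length_nil] at hi
      by_cases hilt : i < acc.1.length
      · rw [List.getElem_append_left hilt]
        refine ⟨?_, (hstored i hilt).2⟩
        rw [(hstored i hilt).1, List.take_append_of_le_length (by omega)]
      · have hieq : i = acc.1.length := by omega
        subst hieq
        rw [List.getElem_append_right (le_refl _)]
        simp only [Nat.sub_self, List.getElem_cons_zero]
        refine ⟨?_, lt_of_le_of_ne (by simpa using bruteK_le p (sa ++ [c]) p.length) hmatch⟩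
        rw [List.take_of_length_le (by simp [hlen])]

theorem inv_foldl (p : List Char) (hp : p ≠ []) (xs : List Char) :
    ∀ (sa : List Char) (acc : List (Char × Nat) × Nat), StackInv p sa acc →
    StackInv p (xs.foldl (explosionStep p p.length) sa)
      (xs.foldl (altStep p.length (buildTable p p.length)) acc) := by
  induction xs with
  | nil => intro sa acc h; exact h
  | cons c xs ih =>
    intro sa acc h
    simp only [List.foldl_cons]
    exact ih _ _ (inv_step p hp sa acc c h)

theorem inv_init (p : List Char) (hp : p ≠ []) : StackInv p [] ([], 0) := by
  refine ⟨rfl, (bruteK_nil p p.length hp).symm, List.length_pos_iff.mpr hp, ?_⟩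
  intro i h
  simp at h

theorem explosion_empty_exp (main : String) : explosion main "" = main := by
  have h : ∀ (xs : List Char) (sa : List Char),
      xs.foldl (explosionStep ("".toList) ("".toList).length) sa = sa ++ xs := by
    intro xs
    induction xs with
    | nil => intro sa; simp
    | cons c xs ih =>
      intro sa
      simp only [List.foldl_cons]
      have hcond : PySem.List.slice (sa ++ [c]) (some (-((("".toList).length : Nat) : Int))) none
          = sa ++ [c] := by
        norm_num
      have hstep : explosionStep ("".toList) ("".toList).length sa c = sa ++ [c] := by
        unfold explosionStep
        simp only [hcond]
        rw [if_neg (by simp)]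
      rw [hstep, ih]
      simp
  show String.ofList (main.toList.foldl (explosionStep ("".toList) ("".toList).length) []) = main
  rw [h]
  simp

-- ===== VERDICT (by name: the statement is the Claim_ definition above) =====
theorem explosion_spec : Claim_equal_explosion := by
  unfold Claim_equal_explosion Spec_explosion
  intro main exp _
  by_cases hexp : exp = ""
  · subst hexp
    rw [explosion_empty_exp]
    unfold explosion_alt
    simp
  · have hp : exp.toList ≠ [] := by
      intro h
      exact hexp (by simpa using congrArg String.ofList h)
    unfold explosion explosion_alt
    rw [if_neg hexp]
    have := inv_foldl exp.toList hp main.toList [] ([], 0) (inv_init exp.toList hp)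
    obtain ⟨hmap, _, _, _⟩ := this
    simp only []
    rw [hmap]
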